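-- pv_equiv track=rewrite | github.com/FidelSol/-Python-GeekBrains | -Python-GeekBrains--_4_PYTHON/урок №4 Соловьев Ф.М..py | fact_gen
-- ===== SOURCE A (Python) =====
-- def fact_gen(number):
--     f_num = 1
--     if number == 0:
--         yield f'{number}!= 1'
--     else:
--         for i in range(1, number + 1):
--             f_num *= i
--             yield f'{i}!= {f_num}'
-- ===== SOURCE B (Python) =====
-- import math
--
--
-- def fact_gen(number):
--     # Back-to-front: compute number! once, emit lines from number down to 1
--     # while dividing the factorial down, then reverse.
--     if number == 0:
--         yield f'{number}!= 1'
--     elif number >= 1: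
--         lines = []
--         f = math.factorial(number)
--         i = number
--         while i >= 1:
--             lines.append(f'{i}!= {f}')
--             f //= i
--             i -= 1
--         lines.reverse()
--         yield from lines
-- ===== Notes on version B (the rewrite author's own statement) =====
-- stated objective: alternative
-- what changed: Replaces the ascending running-product loop with a descending while loop that computes number! once via math.factorial, divides it down step by step, builds the lines back-to-front and reverses them.
import Mathlib
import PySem

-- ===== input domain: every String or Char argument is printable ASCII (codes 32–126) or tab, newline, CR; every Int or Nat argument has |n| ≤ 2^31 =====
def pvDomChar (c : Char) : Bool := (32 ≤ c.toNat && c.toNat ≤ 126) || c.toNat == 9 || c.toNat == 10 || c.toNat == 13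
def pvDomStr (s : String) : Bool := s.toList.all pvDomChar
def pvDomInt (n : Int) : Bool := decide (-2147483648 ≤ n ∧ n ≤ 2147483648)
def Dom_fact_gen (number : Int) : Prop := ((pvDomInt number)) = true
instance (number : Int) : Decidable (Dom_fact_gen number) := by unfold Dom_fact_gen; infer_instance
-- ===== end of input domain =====

-- B replaces A's ascending running-product loop by a descending while loop: it computes
-- number! once, emits lines from number down to 1 dividing the factorial down, then reverses.
-- Objective: alternative algorithm; no speed claim.

-- ===== PORT A =====
-- A threads the accumulator f_num through the ascending loop, collecting the yielded strings.
def fact_gen (number : Int) : List String :=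
  if number == 0 then [PySem.Int.toStr number ++ "!= 1"]
  else
    ((PySem.List.pyRange 1 (number + 1) 1).foldl
      (fun (s : Int × List String) i =>
        let f_num := s.1 * i
        (f_num, s.2 ++ [PySem.Int.toStr i ++ "!= " ++ PySem.Int.toStr f_num]))
      (1, [])).2

-- ===== PORT B =====
-- the 'while i >= 1' loop of Source B, recursing on i (a Nat since the loop counts i down to 1);
-- 'f //= i' is Python floor division → PySem.Int.floordiv
def fact_gen_altLoop : Nat → Int → List String → List String
  | 0, _, lines => lines
  | Nat.succ m, f, lines =>
      fact_gen_altLoop m (PySem.Int.floordiv f ((Nat.succ m : Nat) : Int))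
        (lines ++ [PySem.Int.toStr ((Nat.succ m : Nat) : Int) ++ "!= " ++ PySem.Int.toStr f])

-- math.factorial number → Nat.factorial number.toNat (called only when number ≥ 1)
def fact_gen_alt (number : Int) : List String :=
  if number == 0 then [PySem.Int.toStr number ++ "!= 1"]
  else if 1 ≤ number then
    (fact_gen_altLoop number.toNat ((Nat.factorial number.toNat : Nat) : Int) []).reverse
  else []

-- ===== PRECONDITION & SPEC =====
def Spec_fact_gen (number : Int) (out : List String) : Prop := out = fact_gen_alt number
instance (number : Int) (out : List String) : Decidable (Spec_fact_gen number out) := by unfold Spec_fact_gen; infer_instance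

-- ===== CLAIM (what is proved, stated in full; the proofs are below) =====
def Claim_equal_fact_gen : Prop := ∀ (number : Int), Dom_fact_gen number → Spec_fact_gen number (fact_gen number)

-- ===== LEMMAS AND PROOFS =====

-- the ascending line list both loops produce, as a common reference point
def fact_gen_asc (n : Nat) : List String :=
  (PySem.List.pyRange 1 ((n : Int) + 1) 1).map
    (fun i => PySem.Int.toStr i ++ "!= " ++ PySem.Int.toStr (Nat.factorial i.toNat))

-- A's loop invariant: folding the body over range(1, n+1) yields (n!, the ascending list).
theorem fact_gen_loopA (n : Nat) :
    (PySem.List.pyRange 1 ((n : Int) + 1) 1).foldl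
      (fun (s : Int × List String) i =>
        let f_num := s.1 * i
        (f_num, s.2 ++ [PySem.Int.toStr i ++ "!= " ++ PySem.Int.toStr f_num]))
      (1, [])
    = ((Nat.factorial n : Int), fact_gen_asc n) := by
  induction n with
  | zero => simp [fact_gen_asc, PySem.List.pyRange_one_eq_nil, Nat.factorial]
  | succ m ih =>
      have hle : (1 : Int) ≤ (m : Int) + 1 := by omega
      have hsplit := PySem.List.pyRange_one_succ_right hle
      unfold fact_gen_asc
      push_cast
      rw [hsplit, List.foldl_append, List.map_append]
      have ihc : ((PySem.List.pyRange 1 ((m:Int) + 1) 1).foldl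
          (fun (s : Int × List String) i =>
            ((s.1 * i : Int), s.2 ++ [PySem.Int.toStr i ++ "!= " ++ PySem.Int.toStr (s.1 * i)]))
          (1, [])) = ((Nat.factorial m : Int), fact_gen_asc m) := ih
      rw [ihc]; unfold fact_gen_asc
      have ht : (((m : Int) + 1)).toNat = m + 1 := by omega
      simp [ht, Nat.factorial_succ]
      exact ⟨by ring, by rw [mul_comm]⟩

-- B's loop invariant: the descending loop started at (n, n!) appends the ascending list reversed.
theorem fact_gen_loopB (n : Nat) (lines : List String) :
    fact_gen_altLoop n ((Nat.factorial n : Nat) : Int) lines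
      = lines ++ (fact_gen_asc n).reverse := by
  induction n generalizing lines with
  | zero => simp [fact_gen_altLoop, fact_gen_asc, PySem.List.pyRange_one_eq_nil]
  | succ m ih =>
      rw [fact_gen_altLoop]
      have hdiv : PySem.Int.floordiv ((Nat.factorial (m + 1) : Nat) : Int) ((m + 1 : Nat) : Int)
          = ((Nat.factorial m : Nat) : Int) := by
        rw [PySem.Int.floordiv_natCast, Nat.factorial_succ, Nat.mul_div_cancel_left _ (Nat.succ_pos m)]
      rw [hdiv, ih]
      have hle : (1 : Int) ≤ (m : Int) + 1 := by omega
      unfold fact_gen_asc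
      push_cast
      rw [PySem.List.pyRange_one_succ_right hle, List.map_append]
      have ht : (((m : Int) + 1)).toNat = m + 1 := by omega
      simp [ht]

-- ===== VERDICT (by name: the statement is the Claim_ definition above) =====
theorem fact_gen_spec : Claim_equal_fact_gen := by
  intro number _
  unfold Spec_fact_gen fact_gen fact_gen_alt
  by_cases h0 : number = 0
  · simp [h0]
  · simp only [beq_iff_eq, h0, if_false]
    by_cases hpos : 1 ≤ number
    · simp only [hpos, if_true]
      obtain ⟨n, hn⟩ : ∃ n : Nat, number = (n : Int) := ⟨number.toNat, by omega⟩
      subst hn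
      rw [fact_gen_loopA n]
      have ht : ((n : Int)).toNat = n := by omega
      rw [ht, fact_gen_loopB n []]
      simp
    · simp only [hpos, if_false]
      have : number + 1 ≤ 1 := by omega
      rw [PySem.List.pyRange_one_eq_nil this]
      simp
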